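-- pv_equiv track=rewrite | github.com/Ahmad91-9/fsap | downloader_core.py | clean_youtube_url
-- ===== SOURCE A (Python) =====
-- def clean_youtube_url(url: str) -> str:
--     """
--     Clean YouTube URL by removing playlist/radio parameters that might interfere with video extraction.
--     Removes parameters starting from &list, &start_radio, &pp, etc.
--     """
--     if not url or 'youtube.com' not in url and 'youtu.be' not in url:
--         return url
--
--     # Remove parameters that might cause issues with video extraction
--     parameters_to_remove = ['&list=', '&start_radio=', '&pp=', '&index=', '&t=']
--
--     cleaned_url = url
--     for param in parameters_to_remove:
--         if param in cleaned_url: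
--             # Find the position of the parameter and remove everything from there
--             param_pos = cleaned_url.find(param)
--             # Find the next '&' or end of string
--             next_param = cleaned_url.find('&', param_pos + 1)
--             if next_param != -1:
--                 cleaned_url = cleaned_url[:param_pos] + cleaned_url[next_param:]
--             else:
--                 cleaned_url = cleaned_url[:param_pos]
--
--     return cleaned_url
-- ===== SOURCE B (Python) =====
-- def clean_youtube_url(url: str) -> str:
--     """
--     Clean YouTube URL by removing playlist/radio parameters that might interfere with video extraction.
--     Removes parameters starting from &list, &start_radio, &pp, etc.
--     """
--     if not url or 'youtube.com' not in url and 'youtu.be' not in url: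
--         return url
--     # Work on the '&'-separated segments: segment 0 is the untouched prefix;
--     # for each unwanted parameter drop the first later segment carrying it.
--     parts = url.split('&')
--     head, rest = parts[0], parts[1:]
--     for prefix in ['list=', 'start_radio=', 'pp=', 'index=', 't=']:
--         for i, seg in enumerate(rest):
--             if seg.startswith(prefix):
--                 del rest[i]
--                 break
--     return '&'.join([head] + rest)
-- ===== Notes on version B (the rewrite author's own statement) =====
-- stated objective: idiomatic
-- what changed: B splits the URL once on '&' into segments and deletes, per unwanted parameter, the first matching segment after the prefix, joining at the end, instead of A's repeated substring find plus slice-and-concatenate on the raw string.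
import Mathlib
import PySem

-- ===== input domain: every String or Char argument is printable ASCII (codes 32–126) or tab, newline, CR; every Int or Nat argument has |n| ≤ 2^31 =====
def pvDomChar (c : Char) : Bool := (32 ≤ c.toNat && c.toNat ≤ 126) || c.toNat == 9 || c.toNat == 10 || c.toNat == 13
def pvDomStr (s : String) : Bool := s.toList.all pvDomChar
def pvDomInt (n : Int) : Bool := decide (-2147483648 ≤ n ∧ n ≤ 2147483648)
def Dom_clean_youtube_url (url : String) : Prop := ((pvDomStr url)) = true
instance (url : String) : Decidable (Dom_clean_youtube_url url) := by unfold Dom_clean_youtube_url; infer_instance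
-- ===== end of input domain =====

-- B splits the URL once on '&' into segments and drops, per unwanted parameter, the first
-- later segment carrying it, joining at the end — instead of A's repeated substring-find plus
-- slice-and-concatenate on the raw string (objective: idiomatic; same return value everywhere).

-- ===== PORT A =====
-- parameters_to_remove
def pvParamsA : List (List Char) :=
  ["&list=".toList, "&start_radio=".toList, "&pp=".toList, "&index=".toList, "&t=".toList]

-- the body of A's for-loop over parameters_to_remove
def pvCleanStep (cleaned : List Char) (param : List Char) : List Char :=
  if PySem.Chars.isIn param cleaned then
    let param_pos := PySem.Chars.find cleaned param
    let next_param := PySem.Chars.findFrom cleaned ['&'] (param_pos + 1)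
    if next_param ≠ -1 then
      PySem.Chars.slice cleaned none (some param_pos) ++ PySem.Chars.slice cleaned (some next_param) none
    else
      PySem.Chars.slice cleaned none (some param_pos)
  else cleaned

def clean_youtube_url (url : String) : String :=
  if url == "" || (!(PySem.Str.isIn "youtube.com" url) && !(PySem.Str.isIn "youtu.be" url)) then url
  else String.ofList (pvParamsA.foldl pvCleanStep url.toList)

-- ===== PORT B =====
def pvPrefixesB : List (List Char) :=
  ["list=".toList, "start_radio=".toList, "pp=".toList, "index=".toList, "t=".toList]

-- B's inner for-loop: delete the first later segment starting with p (break), keep the rest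
def pvRemoveFirst (p : List Char) : List (List Char) → List (List Char)
  | [] => []
  | s :: rest => if PySem.Chars.startswith s p then rest else s :: pvRemoveFirst p rest

def clean_youtube_url_alt (url : String) : String :=
  if url == "" || (!(PySem.Str.isIn "youtube.com" url) && !(PySem.Str.isIn "youtu.be" url)) then url
  else
    match PySem.Chars.splitOn url.toList ['&'] with
    | [] => url   -- unreachable: split with a nonempty separator never returns [] (totality guard)
    | head :: rest =>
        String.ofList (PySem.Chars.join ['&']
          (head :: pvPrefixesB.foldl (fun r p => pvRemoveFirst p r) rest))

-- ===== PRECONDITION & SPEC =====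
def Spec_clean_youtube_url (url : String) (out : String) : Prop := out = clean_youtube_url_alt url
instance (url : String) (out : String) : Decidable (Spec_clean_youtube_url url out) := by unfold Spec_clean_youtube_url; infer_instance

-- ===== CLAIM (what is proved, stated in full; the proofs are below) =====
def Claim_equal_clean_youtube_url : Prop := ∀ (url : String), Dom_clean_youtube_url url → Spec_clean_youtube_url url (clean_youtube_url url)

-- ===== LEMMAS AND PROOFS =====
def pvAmpSplit : List Char → List (List Char)
  | [] => [[]]
  | c :: r => if c = '&' then [] :: pvAmpSplit r else (pvAmpSplit r).modifyHead (c :: ·)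

lemma pvAmpSplit_amp (r : List Char) : pvAmpSplit ('&' :: r) = [] :: pvAmpSplit r := by
  simp [pvAmpSplit]

lemma pvAmpSplit_cons (c : Char) (r : List Char) (hc : c ≠ '&') :
    pvAmpSplit (c :: r) = (pvAmpSplit r).modifyHead (c :: ·) := by
  simp [pvAmpSplit, hc]

set_option maxRecDepth 10000 in
lemma pvGo_eq (fuel : Nat) : ∀ (l cur : List Char) (acc : List (List Char)), l.length ≤ fuel →
    PySem.Chars.splitOn.go ['&'] fuel l cur acc
      = acc.reverse ++ (pvAmpSplit l).modifyHead (cur.reverse ++ ·) := by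
  induction fuel with
  | zero =>
    intro l cur acc hl
    have : l = [] := by cases l <;> simp_all
    subst this
    rw [PySem.Chars.splitOn.go.eq_def]
    simp [pvAmpSplit]
  | succ fuel ih =>
    intro l cur acc hl
    cases l with
    | nil =>
      rw [PySem.Chars.splitOn.go.eq_def]
      simp [pvAmpSplit]
    | cons c rest =>
      rw [PySem.Chars.splitOn.go.eq_def]
      simp only [List.isPrefixOf, Bool.and_true]
      by_cases hc : c = '&'
      · subst hc
        simp only [beq_self_eq_true, if_pos]
        have hd : List.drop ['&'].length ('&' :: rest) = rest := rfl
        rw [hd, ih rest [] (List.reverse cur :: acc) (by simpa using Nat.le_of_succ_le_succ (by simpa using hl)),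
          pvAmpSplit_amp]
        cases hps : pvAmpSplit rest <;>
          simp [List.modifyHead_cons, List.modifyHead_nil]
      · have hb : ('&' == c) = false := beq_eq_false_iff_ne.2 (Ne.symm hc)
        simp only [hb, if_neg, Bool.false_eq_true, not_false_iff]
        rw [ih rest (c :: cur) acc (by simpa using Nat.le_of_succ_le_succ (by simpa using hl)),
          pvAmpSplit_cons c rest hc]
        cases hps : pvAmpSplit rest <;>
          simp [List.modifyHead_cons, List.modifyHead_nil, List.append_assoc]

lemma pvSplitOn_amp (l : List Char) : PySem.Chars.splitOn l ['&'] = pvAmpSplit l := by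
  show PySem.Chars.splitOn.go ['&'] (l.length + 1) l [] [] = _
  rw [pvGo_eq (l.length + 1) l [] [] (by omega)]
  cases hps : pvAmpSplit l <;> simp [List.modifyHead]

lemma pvAmpSplit_ne_nil (l : List Char) : pvAmpSplit l ≠ [] := by
  induction l with
  | nil => simp [pvAmpSplit]
  | cons c r ih =>
    simp only [pvAmpSplit]
    split
    · simp
    · cases hps : pvAmpSplit r
      · exact absurd hps ih
      · simp [List.modifyHead]

lemma pvAmpSplit_noamp (l : List Char) : ∀ s ∈ pvAmpSplit l, '&' ∉ s := by
  induction l with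
  | nil => simp [pvAmpSplit]
  | cons c r ih =>
    simp only [pvAmpSplit]
    split
    · intro s hs
      rcases List.mem_cons.1 hs with h | h
      · simp [h]
      · exact ih s h
    · rename_i hc
      cases hps : pvAmpSplit r with
      | nil => exact absurd hps (pvAmpSplit_ne_nil r)
      | cons a t =>
        intro s hs
        simp only [List.modifyHead] at hs
        rcases List.mem_cons.1 hs with h | h
        · subst h
          intro hmem
          rcases List.mem_cons.1 hmem with h | h
          · exact hc h.symm
          · exact ih a (by rw [hps]; exact List.mem_cons_self) h
        · exact ih s (by rw [hps]; exact List.mem_cons_of_mem _ h)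

lemma pvJoin_amp (h : List Char) (segs : List (List Char)) :
    PySem.Chars.join ['&'] (h :: segs) = h ++ (segs.map (fun s => '&' :: s)).flatten := by
  induction segs generalizing h with
  | nil => simp [PySem.Chars.join_singleton]
  | cons s t ih =>
    rw [PySem.Chars.join_cons_cons, ih s]
    simp

lemma pvJoin_ampSplit (l : List Char) : PySem.Chars.join ['&'] (pvAmpSplit l) = l := by
  induction l with
  | nil => simp [pvAmpSplit, PySem.Chars.join_singleton]
  | cons c r ih =>
    simp only [pvAmpSplit]
    split
    · rename_i hc
      subst hc
      cases hps : pvAmpSplit r with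
      | nil => exact absurd hps (pvAmpSplit_ne_nil r)
      | cons a t =>
        rw [PySem.Chars.join_cons_cons]
        rw [hps] at ih
        simp [ih]
    · cases hps : pvAmpSplit r with
      | nil => exact absurd hps (pvAmpSplit_ne_nil r)
      | cons a t =>
        rw [hps] at ih
        cases t with
        | nil => simp_all [List.modifyHead, PySem.Chars.join_singleton]
        | cons b t' =>
          simp only [List.modifyHead]
          rw [PySem.Chars.join_cons_cons] at ih ⊢
          simp [ih]


lemma pvRemoveFirst_subset (p : List Char) : ∀ segs s, s ∈ pvRemoveFirst p segs → s ∈ segs := by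
  intro segs
  induction segs with
  | nil => simp [pvRemoveFirst]
  | cons a t ih =>
    intro s hs
    simp only [pvRemoveFirst] at hs
    split at hs
    · exact List.mem_cons_of_mem _ hs
    · rcases List.mem_cons.1 hs with h | h
      · exact h ▸ List.mem_cons_self
      · exact List.mem_cons_of_mem _ (ih s h)

lemma pvPseg (p : List Char) (hp : '&' ∉ p) : ∀ (s t : List Char), '&' ∉ s →
    (t = [] ∨ ∃ t', t = '&' :: t') → (p <+: s ++ t ↔ p <+: s) := by
  induction p with
  | nil => intro s t _ _; simp
  | cons a p' ih =>
    intro s t hs ht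
    cases s with
    | nil =>
      simp only [List.nil_append]
      constructor
      · intro hpre
        exfalso
        rcases ht with rfl | ⟨t', rfl⟩
        · simp at hpre
        · rw [List.cons_prefix_cons] at hpre
          exact hp (hpre.1 ▸ List.mem_cons_self)
      · intro hpre
        simp at hpre
    | cons b s' =>
      simp only [List.cons_append, List.cons_prefix_cons]
      constructor
      · rintro ⟨rfl, hpre⟩
        exact ⟨rfl, (ih (fun hm => hp (List.mem_cons_of_mem _ hm)) s' t
          (fun hm => hs (List.mem_cons_of_mem _ hm)) ht).1 hpre⟩
      · rintro ⟨rfl, hpre⟩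
        exact ⟨rfl, (ih (fun hm => hp (List.mem_cons_of_mem _ hm)) s' t
          (fun hm => hs (List.mem_cons_of_mem _ hm)) ht).2 hpre⟩

lemma pvFind_eq_coe (s sub : List Char) (n : Nat) (h1 : sub <+: s.drop n)
    (h2 : ∀ i < n, ¬ sub <+: s.drop i) : PySem.Chars.find s sub = n := by
  have hinf : sub <:+: s := h1.isInfix.trans (List.drop_suffix n s).isInfix
  have hpos : 0 ≤ PySem.Chars.find s sub := (PySem.Chars.find_nonneg_iff s sub).2 hinf
  obtain ⟨hf1, hf2⟩ := PySem.Chars.find_spec hpos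
  have h3 : ¬ n < (PySem.Chars.find s sub).toNat := fun hlt => hf2 n hlt h1
  have h4 : ¬ (PySem.Chars.find s sub).toNat < n := fun hlt => h2 _ hlt hf1
  omega

lemma pvNoPrefixInNoamp (h t p : List Char) (hh : '&' ∉ h) (i : Nat) (hi : i < h.length) :
    ¬ ('&' :: p) <+: (h ++ t).drop i := by
  intro hpre
  have hlen : i < (h ++ t).length := by simp; omega
  rw [← List.getElem_cons_drop hlen, List.cons_prefix_cons] at hpre
  have : (h ++ t)[i] = h[i] := List.getElem_append_left hi
  exact hh (hpre.1 ▸ this ▸ List.getElem_mem hi)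

lemma pvInfix_amp_append (h t p : List Char) (hh : '&' ∉ h) :
    (('&' :: p) <:+: h ++ t) ↔ (('&' :: p) <:+: t) := by
  induction h with
  | nil => simp
  | cons c h' ih =>
    rw [List.cons_append, List.infix_cons_iff]
    constructor
    · rintro (hpre | hinf)
      · rw [List.cons_prefix_cons] at hpre
        exact absurd (hpre.1 ▸ List.mem_cons_self) hh
      · exact (ih (fun hm => hh (List.mem_cons_of_mem _ hm))).1 hinf
    · intro hinf
      exact Or.inr ((ih (fun hm => hh (List.mem_cons_of_mem _ hm))).2 hinf)

lemma pvFind_nil (p : List Char) : PySem.Chars.find [] ('&' :: p) = -1 := by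
  simp [PySem.Chars.find, PySem.Chars.find.go]

lemma pvFind_amp_append (h t p : List Char) (hh : '&' ∉ h) :
    PySem.Chars.find (h ++ t) ('&' :: p)
      = if PySem.Chars.find t ('&' :: p) = -1 then -1
        else (h.length : Int) + PySem.Chars.find t ('&' :: p) := by
  by_cases hinf : ('&' :: p) <:+: t
  · have hne : PySem.Chars.find t ('&' :: p) ≠ -1 := (PySem.Chars.find_ne_neg_one_iff t _).2 hinf
    have hpos : 0 ≤ PySem.Chars.find t ('&' :: p) := (PySem.Chars.find_nonneg_iff t _).2 hinf
    obtain ⟨hf1, hf2⟩ := PySem.Chars.find_spec hpos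
    rw [if_neg hne]
    have hd : (h ++ t).drop (h.length + (PySem.Chars.find t ('&' :: p)).toNat)
        = t.drop (PySem.Chars.find t ('&' :: p)).toNat := by
      rw [List.drop_append]
      simp
    have := pvFind_eq_coe (h ++ t) ('&' :: p) (h.length + (PySem.Chars.find t ('&' :: p)).toNat)
      (by rw [hd]; exact hf1)
      (by
        intro i hi
        by_cases hcase : i < h.length
        · exact pvNoPrefixInNoamp h t p hh i hcase
        · rw [List.drop_append, List.drop_eq_nil_of_le (by omega), List.nil_append]
          exact hf2 (i - h.length) (by omega))
    rw [this]
    push_cast [Int.toNat_of_nonneg hpos]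
    omega
  · have h1 : PySem.Chars.find t ('&' :: p) = -1 := (PySem.Chars.find_eq_neg_one_iff t _).2 hinf
    rw [if_pos h1, PySem.Chars.find_eq_neg_one_iff]
    rw [pvInfix_amp_append h t p hh]
    exact hinf

lemma pvFind_amp_skip (s t p : List Char) (hs : '&' ∉ s) (hp : '&' ∉ p) (hnp : ¬ p <+: s)
    (ht : t = [] ∨ ∃ t', t = '&' :: t') :
    PySem.Chars.find (('&' :: s) ++ t) ('&' :: p)
      = if PySem.Chars.find t ('&' :: p) = -1 then -1
        else (1 + s.length : Int) + PySem.Chars.find t ('&' :: p) := by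
  by_cases hinf : ('&' :: p) <:+: t
  · have hne : PySem.Chars.find t ('&' :: p) ≠ -1 := (PySem.Chars.find_ne_neg_one_iff t _).2 hinf
    have hpos : 0 ≤ PySem.Chars.find t ('&' :: p) := (PySem.Chars.find_nonneg_iff t _).2 hinf
    obtain ⟨hf1, hf2⟩ := PySem.Chars.find_spec hpos
    rw [if_neg hne]
    have hd : (('&' :: s) ++ t).drop (1 + s.length + (PySem.Chars.find t ('&' :: p)).toNat)
        = t.drop (PySem.Chars.find t ('&' :: p)).toNat := by
      rw [List.drop_append, List.drop_eq_nil_of_le (by simp; omega), List.nil_append]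
      congr 1
      simp
      omega
    have := pvFind_eq_coe (('&' :: s) ++ t) ('&' :: p)
      (1 + s.length + (PySem.Chars.find t ('&' :: p)).toNat)
      (by rw [hd]; exact hf1)
      (by
        intro i hi
        match i with
        | 0 =>
          intro hpre
          rw [List.cons_append, List.drop_zero, List.cons_prefix_cons] at hpre
          exact hnp ((pvPseg p hp s t hs ht).1 hpre.2)
        | (j + 1) =>
          by_cases hcase : j < s.length
          · rw [List.cons_append, List.drop_succ_cons]
            exact pvNoPrefixInNoamp s t p hs j hcase
          · rw [List.cons_append, List.drop_succ_cons, List.drop_append,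
              List.drop_eq_nil_of_le (by omega), List.nil_append]
            exact hf2 (j - s.length) (by omega))
    rw [this]
    push_cast [Int.toNat_of_nonneg hpos]
    omega
  · have h1 : PySem.Chars.find t ('&' :: p) = -1 := (PySem.Chars.find_eq_neg_one_iff t _).2 hinf
    rw [if_pos h1, PySem.Chars.find_eq_neg_one_iff, List.cons_append, List.infix_cons_iff]
    rintro (hpre | hinf2)
    · rw [List.cons_prefix_cons] at hpre
      exact hnp ((pvPseg p hp s t hs ht).1 hpre.2)
    · exact hinf ((pvInfix_amp_append s t p hs).1 hinf2)

def pvShifts (p h : List Char) : Prop := ∀ t, (t = [] ∨ ∃ t', t = '&' :: t') →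
    PySem.Chars.find (h ++ t) ('&' :: p)
      = if PySem.Chars.find t ('&' :: p) = -1 then -1
        else (h.length : Int) + PySem.Chars.find t ('&' :: p)

lemma pvShifts_of_noamp (p h : List Char) (hh : '&' ∉ h) : pvShifts p h :=
  fun t _ => pvFind_amp_append h t p hh

lemma pvShifts_extend (p h s : List Char) (hsh : pvShifts p h) (hs : '&' ∉ s) (hp : '&' ∉ p)
    (hnp : ¬ p <+: s) : pvShifts p (h ++ '&' :: s) := by
  intro t ht
  rw [List.append_assoc]
  rw [hsh (('&' :: s) ++ t) (Or.inr ⟨s ++ t, by simp⟩)]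
  rw [pvFind_amp_skip s t p hs hp hnp ht]
  by_cases h1 : PySem.Chars.find t ('&' :: p) = -1
  · simp [h1]
  · have hge : -1 ≤ PySem.Chars.find t ('&' :: p) := PySem.Chars.neg_one_le_find t _
    rw [if_neg h1, if_neg (by omega), if_neg h1]
    simp
    omega

lemma pvStartswith_true {s p : List Char} (h : p <+: s) : PySem.Chars.startswith s p = true := by
  simp [PySem.Chars.startswith]
  exact h

lemma pvStartswith_false {s p : List Char} (h : ¬ p <+: s) : PySem.Chars.startswith s p = false := by
  by_cases hq : PySem.Chars.startswith s p = true
  · exact absurd (by simpa [PySem.Chars.startswith] using hq) h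
  · simpa using hq

lemma pvMain_step (p : List Char) (hp : '&' ∉ p) :
    ∀ (segs : List (List Char)) (h : List Char), pvShifts p h → (∀ s ∈ segs, '&' ∉ s) →
    pvCleanStep (h ++ (segs.map (fun s => '&' :: s)).flatten) ('&' :: p)
      = h ++ ((pvRemoveFirst p segs).map (fun s => '&' :: s)).flatten := by
  intro segs
  induction segs with
  | nil =>
    intro h hsh _
    have h0 : PySem.Chars.find (h ++ []) ('&' :: p) = -1 := by
      rw [hsh [] (Or.inl rfl), pvFind_nil]
      simp
    simp only [List.map_nil, List.flatten_nil, List.append_nil] at h0 ⊢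
    simp [pvCleanStep, PySem.Chars.isIn, h0, pvRemoveFirst]
  | cons s rest ih =>
    intro h hsh hnoamp
    have hs : '&' ∉ s := hnoamp s List.mem_cons_self
    by_cases hsp : p <+: s
    · -- the parameter matches this segment: A cuts it out, B removes it
      have hcons : ((s :: rest).map (fun s => '&' :: s)).flatten
          = '&' :: (s ++ (rest.map (fun s => '&' :: s)).flatten) := by simp
      rw [hcons]
      have hfind0 : PySem.Chars.find ('&' :: (s ++ (rest.map (fun s => '&' :: s)).flatten)) ('&' :: p) = (0 : Nat) := by
        apply pvFind_eq_coe
        · rw [List.drop_zero, List.cons_prefix_cons]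
          exact ⟨rfl, hsp.trans (List.prefix_append s _)⟩
        · intro i hi
          omega
      have hfind : PySem.Chars.find (h ++ '&' :: (s ++ (rest.map (fun s => '&' :: s)).flatten)) ('&' :: p)
          = (h.length : Int) := by
        rw [hsh ('&' :: (s ++ (rest.map (fun s => '&' :: s)).flatten)) (Or.inr ⟨_, rfl⟩), hfind0]
        simp
      have hin : PySem.Chars.isIn ('&' :: p) (h ++ '&' :: (s ++ (rest.map (fun s => '&' :: s)).flatten)) = true := by
        simp [PySem.Chars.isIn, hfind]
      simp only [pvCleanStep, hin, if_true, hfind]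
      have hcast : (h.length : Int) + 1 = ((h.length + 1 : Nat) : Int) := by push_cast; ring
      rw [hcast, PySem.Chars.findFrom_natCast _ _ (h.length + 1) (by simp)]
      have hdrop : (h ++ '&' :: (s ++ (rest.map (fun s => '&' :: s)).flatten)).drop (h.length + 1)
          = s ++ (rest.map (fun s => '&' :: s)).flatten := by
        rw [List.drop_append, List.drop_eq_nil_of_le (by omega), List.nil_append]
        have : h.length + 1 - h.length = 1 := by omega
        rw [this, List.drop_one, List.tail_cons]
      rw [hdrop]
      have htake : PySem.List.slice (h ++ '&' :: (s ++ (rest.map (fun s => '&' :: s)).flatten)) none (some (h.length : Int)) = h := by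
        rw [PySem.List.slice_to _ (by omega), Int.toNat_natCast, List.take_left]
      cases rest with
      | nil =>
        have hnofind : PySem.Chars.find (s ++ (List.map (fun s => '&' :: s) []).flatten) ['&'] = -1 := by
          rw [PySem.Chars.find_eq_neg_one_iff]
          intro hinf
          exact hs (by simpa using hinf.subset List.mem_cons_self)
        rw [hnofind, if_pos (show (-1 : Int) = -1 from rfl),
          if_neg (show ¬((-1 : Int) ≠ -1) from fun hc => hc rfl)]
        simp only [PySem.Chars.slice_eq_listSlice]
        rw [htake]
        rw [pvRemoveFirst, pvStartswith_true hsp]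
        simp
      | cons r rest' =>
        have hw : (List.map (fun s => '&' :: s) (r :: rest')).flatten
            = '&' :: (r ++ (List.map (fun s => '&' :: s) rest').flatten) := by simp
        have hfamp : PySem.Chars.find (s ++ (List.map (fun s => '&' :: s) (r :: rest')).flatten) ['&'] = (s.length : Nat) := by
          apply pvFind_eq_coe
          · rw [List.drop_left, hw]
            exact List.cons_prefix_cons.2 ⟨rfl, List.nil_prefix⟩
          · intro i hi
            exact pvNoPrefixInNoamp s _ [] hs i hi
        rw [hfamp, if_neg (show ¬((s.length : Int) = -1) by omega),
          if_pos (show (((h.length + 1 : Nat) : Int) + (s.length : Int)) ≠ -1 by push_cast; omega)]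
        simp only [PySem.Chars.slice_eq_listSlice]
        rw [htake]
        have hfrom : PySem.List.slice (h ++ '&' :: (s ++ (List.map (fun s => '&' :: s) (r :: rest')).flatten))
            (some (((h.length + 1 : Nat) : Int) + (s.length : Int))) none
            = (List.map (fun s => '&' :: s) (r :: rest')).flatten := by
          rw [PySem.List.slice_from _ (by omega)]
          have h1 : ((((h.length + 1 : Nat) : Int)) + (s.length : Int)).toNat = h.length + 1 + s.length := by
            omega
          rw [h1, List.drop_append, List.drop_eq_nil_of_le (by omega), List.nil_append]
          have h2 : h.length + 1 + s.length - h.length = s.length + 1 := by omega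
          rw [h2]
          have h3 : ('&' :: (s ++ (List.map (fun s => '&' :: s) (r :: rest')).flatten)).drop (s.length + 1)
              = (s ++ (List.map (fun s => '&' :: s) (r :: rest')).flatten).drop s.length := by
            simp
          rw [h3, List.drop_left]
        rw [hfrom]
        rw [pvRemoveFirst, pvStartswith_true hsp]
        simp
    · -- no match here: both sides keep the segment and continue
      have key := ih (h ++ '&' :: s) (pvShifts_extend p h s hsh hs hp hsp)
        (fun x hx => hnoamp x (List.mem_cons_of_mem _ hx))
      have hcons : h ++ ((s :: rest).map (fun s => '&' :: s)).flatten
          = (h ++ '&' :: s) ++ (rest.map (fun s => '&' :: s)).flatten := by simp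
      rw [hcons, key, pvRemoveFirst, pvStartswith_false hsp]
      simp

lemma pvMain_fold : ∀ (ps : List (List Char)), (∀ p ∈ ps, '&' ∉ p) →
    ∀ (h : List Char) (segs : List (List Char)), '&' ∉ h → (∀ s ∈ segs, '&' ∉ s) →
    (ps.map (fun p => '&' :: p)).foldl pvCleanStep (h ++ (segs.map (fun s => '&' :: s)).flatten)
      = h ++ ((ps.foldl (fun r p => pvRemoveFirst p r) segs).map (fun s => '&' :: s)).flatten := by
  intro ps
  induction ps with
  | nil => intro _ h segs _ _; simp
  | cons p ps' ih =>
    intro hps h segs hh hsegs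
    simp only [List.map_cons, List.foldl_cons]
    rw [pvMain_step p (hps p List.mem_cons_self) segs h (pvShifts_of_noamp p h hh) hsegs]
    exact ih (fun q hq => hps q (List.mem_cons_of_mem _ hq)) h (pvRemoveFirst p segs) hh
      (fun s hsmem => hsegs s (pvRemoveFirst_subset p segs s hsmem))

-- ===== VERDICT (by name: the statement is the Claim_ definition above) =====
theorem clean_youtube_url_spec : Claim_equal_clean_youtube_url := by
  intro url _
  unfold Spec_clean_youtube_url
  unfold clean_youtube_url clean_youtube_url_alt
  by_cases hg : (url == "" || (!(PySem.Str.isIn "youtube.com" url) && !(PySem.Str.isIn "youtu.be" url))) = true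
  · rw [if_pos hg, if_pos hg]
  · rw [if_neg hg, if_neg hg, pvSplitOn_amp]
    cases hAS : pvAmpSplit url.toList with
    | nil => exact absurd hAS (pvAmpSplit_ne_nil _)
    | cons h segs =>
      have hurl : url.toList = h ++ (segs.map (fun s => '&' :: s)).flatten := by
        have hj := pvJoin_ampSplit url.toList
        rw [hAS, pvJoin_amp] at hj
        exact hj.symm
      have hh : '&' ∉ h := pvAmpSplit_noamp url.toList h (by rw [hAS]; exact List.mem_cons_self)
      have hsegs : ∀ s ∈ segs, '&' ∉ s := fun s hs =>
        pvAmpSplit_noamp url.toList s (by rw [hAS]; exact List.mem_cons_of_mem _ hs)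
      have hparams : pvParamsA = pvPrefixesB.map (fun p => '&' :: p) := by decide
      have hpref : ∀ p ∈ pvPrefixesB, '&' ∉ p := by decide
      conv_lhs => rw [hparams, hurl]
      rw [pvMain_fold pvPrefixesB hpref h segs hh hsegs]
      show _ = String.ofList (PySem.Chars.join ['&']
        (h :: List.foldl (fun r p => pvRemoveFirst p r) segs pvPrefixesB))
      rw [pvJoin_amp]
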